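-- pv_equiv track=rewrite | github.com/kedz/mrt | mrt/viggo/mr_utils.py | _delex_tokens
-- ===== SOURCE A (Python) =====
-- def _delex_tokens(tokens, pattern, placeholder):
--     i = 0
--     while i < len(tokens):
--         s = max(i - len(pattern) + 1, 0)
--         if [x.lower() for x in tokens[s:i+1]] == pattern:
--             tokens = tokens[:s] + [placeholder] + tokens[i+1:]
--             i = s + 1
--         else:
--             i += 1
--     return tokens
-- ===== SOURCE B (Python) =====
-- def _delex_tokens(tokens, pattern, placeholder):
--     m = len(pattern)
--     out = []
--     for tok in tokens:
--         out.append(tok)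
--         if len(out) >= m and [x.lower() for x in out[len(out) - m:]] == pattern:
--             del out[len(out) - m:]
--             out.append(placeholder)
--     return out
-- ===== Notes on version B (the rewrite author's own statement) =====
-- stated objective: faster
-- what changed: Replaces A's while-loop that rebuilds the whole token list by slicing+concatenation on every match (and re-slices a window per position) with a single left-to-right pass maintaining an output stack: push each token, and when the last len(pattern) pushed tokens lowercase-match the pattern, pop them and push the placeholder.
import Mathlib
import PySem

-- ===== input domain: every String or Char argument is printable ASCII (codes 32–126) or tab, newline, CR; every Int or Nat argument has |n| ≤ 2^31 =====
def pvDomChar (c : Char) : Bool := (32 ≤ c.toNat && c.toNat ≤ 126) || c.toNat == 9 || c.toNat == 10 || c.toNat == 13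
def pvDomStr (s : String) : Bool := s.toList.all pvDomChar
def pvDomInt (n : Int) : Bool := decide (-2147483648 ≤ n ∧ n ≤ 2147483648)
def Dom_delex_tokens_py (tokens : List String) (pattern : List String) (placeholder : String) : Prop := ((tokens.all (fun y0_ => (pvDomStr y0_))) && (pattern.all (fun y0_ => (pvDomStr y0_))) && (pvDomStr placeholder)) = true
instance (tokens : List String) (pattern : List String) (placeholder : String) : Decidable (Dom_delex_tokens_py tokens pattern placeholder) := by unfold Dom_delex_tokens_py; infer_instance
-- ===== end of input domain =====

-- B replaces A's rescan-with-list-rebuild loop by a single left-to-right pass over the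
-- tokens with an output stack (objective: faster — no per-match list reconstruction).

-- ===== PORT A =====
-- A's while-loop; fuel = tokens.length - i, which decreases by exactly 1 each iteration
-- (both on a match and on a miss), so the top-level call with fuel = tokens.length is exact.
def delexALoop (pattern : List String) (placeholder : String) :
    Nat → List String → Int → List String
  | 0, tokens, _ => tokens
  | fuel + 1, tokens, i =>
    if i < PySem.List.len tokens then
      let s := max (i - PySem.List.len pattern + 1) 0
      if (PySem.List.slice tokens (some s) (some (i + 1))).map PySem.Str.lower = pattern then
        delexALoop pattern placeholder fuel
          (PySem.List.slice tokens none (some s) ++ [placeholder] ++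
            PySem.List.slice tokens (some (i + 1)) none) (s + 1)
      else
        delexALoop pattern placeholder fuel tokens (i + 1)
    else tokens

def delex_tokens_py (tokens : List String) (pattern : List String) (placeholder : String) : List String :=
  delexALoop pattern placeholder tokens.length tokens 0

-- ===== PORT B =====
def delexBStep (pattern : List String) (placeholder : String) (out : List String) (tok : String) : List String :=
  let out' := out ++ [tok]
  if pattern.length ≤ out'.length ∧
      (out'.drop (out'.length - pattern.length)).map PySem.Str.lower = pattern then
    out'.take (out'.length - pattern.length) ++ [placeholder]
  else out'

def delex_tokens_py_alt (tokens : List String) (pattern : List String) (placeholder : String) : List String :=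
  tokens.foldl (delexBStep pattern placeholder) []

-- ===== PRECONDITION & SPEC =====
def Spec_delex_tokens_py (tokens : List String) (pattern : List String) (placeholder : String) (out : List String) : Prop := out = delex_tokens_py_alt tokens pattern placeholder
instance (tokens : List String) (pattern : List String) (placeholder : String) (out : List String) : Decidable (Spec_delex_tokens_py tokens pattern placeholder out) := by unfold Spec_delex_tokens_py; infer_instance

-- ===== CLAIM (what is proved, stated in full; the proofs are below) =====
def Claim_equal_delex_tokens_py : Prop := ∀ (tokens : List String) (pattern : List String) (placeholder : String), Dom_delex_tokens_py tokens pattern placeholder → Spec_delex_tokens_py tokens pattern placeholder (delex_tokens_py tokens pattern placeholder)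

-- ===== LEMMAS AND PROOFS =====

theorem delexALoop_succ (pattern : List String) (placeholder : String) (fuel : Nat)
    (tokens : List String) (i : Int) (h : i < PySem.List.len tokens) :
    delexALoop pattern placeholder (fuel + 1) tokens i =
      if (PySem.List.slice tokens (some (max (i - PySem.List.len pattern + 1) 0)) (some (i + 1))).map PySem.Str.lower = pattern then
        delexALoop pattern placeholder fuel
          (PySem.List.slice tokens none (some (max (i - PySem.List.len pattern + 1) 0)) ++ [placeholder] ++
            PySem.List.slice tokens (some (i + 1)) none) ((max (i - PySem.List.len pattern + 1) 0) + 1)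
      else delexALoop pattern placeholder fuel tokens (i + 1) := by
  rw [delexALoop, if_pos h]

-- Invariant: A's loop at state (done ++ rest, i = |done|) computes B's fold of rest from done.
theorem delex_key (pattern : List String) (placeholder : String) :
    ∀ (rest done : List String),
      delexALoop pattern placeholder rest.length (done ++ rest) (done.length : Int) =
        rest.foldl (delexBStep pattern placeholder) done := by
  intro rest
  induction rest with
  | nil => intro done; simp [delexALoop]
  | cons h t ih =>
    intro done
    have hu : done ++ h :: t = (done ++ [h]) ++ t := by simp
    have hlt : (done.length : Int) < PySem.List.len (done ++ h :: t) := by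
      simp [PySem.List.len_eq]
    rw [List.length_cons, delexALoop_succ _ _ _ _ _ hlt]
    by_cases hm : pattern.length ≤ done.length + 1
    · -- full-length window possible
      have hk : done.length + 1 - pattern.length ≤ (done ++ [h]).length := by simp
      have hsmax : max ((done.length : Int) - PySem.List.len pattern + 1) 0
          = ((done.length + 1 - pattern.length : Nat) : Int) := by
        simp [PySem.List.len_eq]; omega
      have hcast : (done.length : Int) + 1 = ((done.length + 1 : Nat) : Int) := by push_cast; ring
      have hwin : PySem.List.slice (done ++ h :: t)
          (some ((done.length + 1 - pattern.length : Nat) : Int))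
          (some ((done.length : Int) + 1))
          = (done ++ [h]).drop (done.length + 1 - pattern.length) := by
        rw [hcast, PySem.List.slice_natCast, hu, List.drop_append_of_le_length hk]
        have hl : ((done ++ [h]).drop (done.length + 1 - pattern.length)).length
            = done.length + 1 - (done.length + 1 - pattern.length) := by simp
        rw [← hl, List.take_left]
      have hrwB : (done ++ [h]).length - pattern.length = done.length + 1 - pattern.length := by
        simp
      rw [hsmax, hwin]
      by_cases hC : ((done ++ [h]).drop (done.length + 1 - pattern.length)).map PySem.Str.lower = pattern
      · rw [if_pos hC]
        have htake : PySem.List.slice (done ++ h :: t) none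
            (some ((done.length + 1 - pattern.length : Nat) : Int))
            = (done ++ [h]).take (done.length + 1 - pattern.length) := by
          rw [PySem.List.slice_to_natCast, hu, List.take_append_of_le_length hk]
        have hdrop : PySem.List.slice (done ++ h :: t) (some ((done.length : Int) + 1)) none = t := by
          rw [hcast, PySem.List.slice_from_natCast, hu]
          have : (done ++ [h]).length = done.length + 1 := by simp
          rw [← this, List.drop_left]
        rw [htake, hdrop]
        have hstep : delexBStep pattern placeholder done h
            = (done ++ [h]).take (done.length + 1 - pattern.length) ++ [placeholder] := by
          unfold delexBStep
          rw [if_pos ⟨by simpa using hm, by rw [hrwB]; exact hC⟩, hrwB]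
        have hlen' : (((done ++ [h]).take (done.length + 1 - pattern.length) ++ [placeholder]).length : Int)
            = ((done.length + 1 - pattern.length : Nat) : Int) + 1 := by
          simp
        calc delexALoop pattern placeholder t.length
              (((done ++ [h]).take (done.length + 1 - pattern.length) ++ [placeholder]) ++ t)
              (((done.length + 1 - pattern.length : Nat) : Int) + 1)
            = delexALoop pattern placeholder t.length
              (((done ++ [h]).take (done.length + 1 - pattern.length) ++ [placeholder]) ++ t)
              ((((done ++ [h]).take (done.length + 1 - pattern.length) ++ [placeholder]).length : Int)) := by
              rw [hlen']
          _ = t.foldl (delexBStep pattern placeholder)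
              ((done ++ [h]).take (done.length + 1 - pattern.length) ++ [placeholder]) := ih _
          _ = (h :: t).foldl (delexBStep pattern placeholder) done := by
              simp [List.foldl_cons, hstep]
      · rw [if_neg hC]
        have hstep : delexBStep pattern placeholder done h = done ++ [h] := by
          unfold delexBStep
          rw [if_neg]
          rintro ⟨-, h2⟩
          exact hC (by rw [← hrwB]; exact h2)
        have : (done.length : Int) + 1 = (((done ++ [h]).length : Nat) : Int) := by simp
        rw [this, hu, ih (done ++ [h])]
        simp [List.foldl_cons, hstep]
    · -- window shorter than pattern: never matches
      have hsmax : max ((done.length : Int) - PySem.List.len pattern + 1) 0 = 0 := by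
        simp [PySem.List.len_eq]; omega
      have hcast : (done.length : Int) + 1 = ((done.length + 1 : Nat) : Int) := by push_cast; ring
      have hwin : PySem.List.slice (done ++ h :: t) (some (0 : Int)) (some ((done.length : Int) + 1))
          = done ++ [h] := by
        rw [hcast]
        rw [show ((0 : Int)) = ((0 : Nat) : Int) by norm_num, PySem.List.slice_natCast, hu]
        have hl1 : (done ++ [h]).length = done.length + 1 := by simp
        rw [List.drop_zero, Nat.sub_zero, ← hl1, List.take_left]
      have hne : (done ++ [h]).map PySem.Str.lower ≠ pattern := by
        intro he
        have := congrArg List.length he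
        simp at this; omega
      rw [hsmax, hwin, if_neg hne]
      have hstep : delexBStep pattern placeholder done h = done ++ [h] := by
        unfold delexBStep
        rw [if_neg]
        rintro ⟨h1, -⟩
        exact hm (by simpa using h1)
      have : (done.length : Int) + 1 = (((done ++ [h]).length : Nat) : Int) := by simp
      rw [this, hu, ih (done ++ [h])]
      simp [List.foldl_cons, hstep]

-- ===== VERDICT (by name: the statement is the Claim_ definition above) =====
theorem delex_tokens_py_spec : Claim_equal_delex_tokens_py := by
  intro tokens pattern placeholder _
  unfold Spec_delex_tokens_py delex_tokens_py delex_tokens_py_alt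
  have := delex_key pattern placeholder tokens []
  simpa using this
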